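-- pv_equiv track=rewrite | github.com/ArWikiCats/ArWikiCats | src/make2_bots/ma_bots/end_start_bots/fax2.py | get_episodes
-- ===== SOURCE A (Python) =====
-- from typing import Dict, Tuple
--
-- def get_episodes(category3: str, category3_nolower: str="") -> Tuple[str, str]:
--     """
--     examples:
--     Category:2016 American television episodes
--     Category:Game of Thrones (season 1) episodes
--     Category:Game of Thrones season 1 episodes
--     """
--
--     list_of_cat = ""
--     if not category3_nolower:
--         category3_nolower = category3
--
--     # Generate episode patterns for seasons 1–10
--     for i in range(1, 11):
--         label = f"حلقات {{}} الموسم {i}"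
--
--         # Generate both key patterns
--         patterns = [
--             f" (season {i}) episodes",
--             f" season {i} episodes",
--         ]
--
--         for key in patterns:
--             # Use lower() once for comparison
--             if category3.lower().endswith(key.lower()):
--                 list_of_cat = label
--                 category3 = category3_nolower.replace(key, "", 1).strip()
--                 return list_of_cat, category3
--
--     list_of_cat = "حلقات {}"
--     category3 = category3_nolower.replace("episodes", "", 1).strip()
--
--     return list_of_cat, category3
-- ===== SOURCE B (Python) =====
-- # B: single suffix parse (strip " episodes", optional ")", trailing digit run, season prefix)
-- # instead of A's 10x2 generate-and-test loop over candidate keys.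
-- SEASONS = ("1", "2", "3", "4", "5", "6", "7", "8", "9", "10")
--
-- def _parse(low):
--     """Which (digits, parenthesised?) season suffix the lowered name ends with, if any."""
--     if low.endswith(" episodes"):
--         body = low[:-len(" episodes")]
--         paren = body.endswith(")")
--         if paren:
--             body = body[:-1]
--         head = body.rstrip("0123456789")
--         digits = body[len(head):]
--         prefix = " (season " if paren else " season "
--         if digits in SEASONS and head.endswith(prefix):
--             return digits, paren
--     return None
--
-- def get_episodes(category3: str, category3_nolower: str = ""):
--     src = category3_nolower or category3
--     m = _parse(category3.lower())
--     if m: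
--         digits, paren = m
--         prefix = " (season " if paren else " season "
--         key = prefix + digits + (")" if paren else "") + " episodes"
--         return f"حلقات {{}} الموسم {digits}", src.replace(key, "", 1).strip()
--     return "حلقات {}", src.replace("episodes", "", 1).strip()
-- ===== Notes on version B (the rewrite author's own statement) =====
-- stated objective: alternative
-- what changed: A generates 20 candidate keys (seasons 1-10, parenthesised and plain) and tests each as a suffix; B instead parses the lowered suffix once (strip ' episodes', optional ')', take the trailing digit run, check the season prefix and that the digits are '1'..'10') and reconstructs the single matching key.
import Mathlib
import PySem

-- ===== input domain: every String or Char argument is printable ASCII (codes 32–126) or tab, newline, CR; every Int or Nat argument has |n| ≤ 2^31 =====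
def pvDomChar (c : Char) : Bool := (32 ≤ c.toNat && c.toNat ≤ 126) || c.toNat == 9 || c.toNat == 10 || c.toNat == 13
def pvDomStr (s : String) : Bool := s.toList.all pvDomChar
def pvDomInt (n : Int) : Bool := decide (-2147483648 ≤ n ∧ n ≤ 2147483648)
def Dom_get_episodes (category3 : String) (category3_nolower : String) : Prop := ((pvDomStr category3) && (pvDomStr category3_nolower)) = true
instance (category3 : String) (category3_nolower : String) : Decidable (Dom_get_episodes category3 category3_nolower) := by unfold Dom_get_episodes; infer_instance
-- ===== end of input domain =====

-- B replaces A's 10×2 generate-and-test loop over candidate keys by a single parse of the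
-- lowered suffix (strip " episodes", optional ")", trailing digit run, season prefix); objective: alternative/faster constant.

-- s.replace(old, "", 1): remove the first (leftmost) occurrence of old; exact port of Python's
-- str.replace with count 1 and empty replacement (PySem has no count-limited replace); both Pythons call it.
def pyReplaceFirstEmpty (s old : List Char) : List Char :=
  let i := PySem.Chars.find s old
  if i < 0 then s else s.take i.toNat ++ s.drop (i.toNat + old.length)

-- ===== PORT A =====
def geKeyParen (i : Int) : List Char :=
  " (season ".toList ++ PySem.Int.toChars i ++ ") episodes".toList

def geKeyPlain (i : Int) : List Char :=
  " season ".toList ++ PySem.Int.toChars i ++ " episodes".toList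

-- 'for i in range(1, 11): for key in patterns: if category3.lower().endswith(key.lower()): return …'
-- (the 2-element inner loop over `patterns` unrolled into the two tests, in order)
def geLoopA (low nl : List Char) : List Int → Option (String × String)
  | [] => none
  | i :: rest =>
    if PySem.Chars.endswith low (PySem.Chars.lower (geKeyParen i)) then
      some (String.ofList ("حلقات {} الموسم ".toList ++ PySem.Int.toChars i),
            String.ofList (PySem.Chars.strip (pyReplaceFirstEmpty nl (geKeyParen i))))
    else if PySem.Chars.endswith low (PySem.Chars.lower (geKeyPlain i)) then
      some (String.ofList ("حلقات {} الموسم ".toList ++ PySem.Int.toChars i),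
            String.ofList (PySem.Chars.strip (pyReplaceFirstEmpty nl (geKeyPlain i))))
    else geLoopA low nl rest

def get_episodes (category3 : String) (category3_nolower : String) : String × String :=
  match geLoopA (PySem.Chars.lower category3.toList)
      (if category3_nolower.toList = [] then category3 else category3_nolower).toList
      (PySem.List.pyRange 1 11) with
  | some r => r
  | none =>
      ("حلقات {}", String.ofList (PySem.Chars.strip (pyReplaceFirstEmpty
        (if category3_nolower.toList = [] then category3 else category3_nolower).toList
        "episodes".toList)))

-- ===== PORT B =====
-- SEASONS = ("1", …, "10"), as character lists
def geSeasons : List (List Char) :=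
  [['1'], ['2'], ['3'], ['4'], ['5'], ['6'], ['7'], ['8'], ['9'], ['1', '0']]

-- the character set of rstrip("0123456789")
def geDigit (c : Char) : Bool := ['0','1','2','3','4','5','6','7','8','9'].contains c

-- helper _parse(low): which (digits, parenthesised?) season suffix the lowered name ends with
def geParse (low : List Char) : Option (List Char × Bool) :=
  if PySem.Chars.endswith low " episodes".toList then
    let body0 := PySem.List.slice low none (some (-9))          -- low[:-len(" episodes")]
    let paren := PySem.Chars.endswith body0 ")".toList
    let body := if paren then PySem.List.slice body0 none (some (-1)) else body0
    let head := List.rdropWhile geDigit body                     -- body.rstrip("0123456789"): drop trailing chars of the set (exact)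
    let digits := body.drop head.length                          -- body[len(head):]
    let pre := if paren then " (season ".toList else " season ".toList
    if geSeasons.contains digits && PySem.Chars.endswith head pre then some (digits, paren)
    else none
  else none

def get_episodes_alt (category3 : String) (category3_nolower : String) : String × String :=
  match geParse (PySem.Chars.lower category3.toList) with
  | some (digits, paren) =>
      (String.ofList ("حلقات {} الموسم ".toList ++ digits),
       String.ofList (PySem.Chars.strip (pyReplaceFirstEmpty
         (if category3_nolower.toList = [] then category3 else category3_nolower).toList
         ((if paren then " (season ".toList else " season ".toList) ++ digits ++
           (if paren then ")".toList else []) ++ " episodes".toList))))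
  | none =>
      ("حلقات {}", String.ofList (PySem.Chars.strip (pyReplaceFirstEmpty
        (if category3_nolower.toList = [] then category3 else category3_nolower).toList
        "episodes".toList)))

-- ===== PRECONDITION & SPEC =====
def Spec_get_episodes (category3 : String) (category3_nolower : String) (out : String × String) : Prop := out = get_episodes_alt category3 category3_nolower
instance (category3 : String) (category3_nolower : String) (out : String × String) : Decidable (Spec_get_episodes category3 category3_nolower out) := by unfold Spec_get_episodes; infer_instance

-- ===== CLAIM (what is proved, stated in full; the proofs are below) =====
def Claim_equal_get_episodes : Prop := ∀ (category3 : String) (category3_nolower : String), Dom_get_episodes category3 category3_nolower → Spec_get_episodes category3 category3_nolower (get_episodes category3 category3_nolower)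

-- ===== LEMMAS AND PROOFS =====

-- the unique key suffix a season match corresponds to, as B reconstructs it
def geKeyOf (d : List Char) (b : Bool) : List Char :=
  (if b then " (season ".toList else " season ".toList) ++ d ++
    (if b then ")".toList else []) ++ " episodes".toList

lemma slice_drop_suffix (x y : List Char) (k : Int) (hk : k = (y.length : Int)) (hy : y ≠ []) :
    PySem.List.slice (x ++ y) none (some (-k)) = x := by
  subst hk
  have hy' : 0 < y.length := List.length_pos_iff.mpr hy
  simp [PySem.List.slice, PySem.List.clampIdx]
  split
  · simp
  · omega

lemma endswith_append (u k : List Char) : PySem.Chars.endswith (u ++ k) k = true := by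
  rw [PySem.Chars.endswith_iff]; exact List.suffix_append u k

lemma endswith_concat_singleton (w : List Char) (c c' : Char) :
    PySem.Chars.endswith (w ++ [c]) [c'] = (c' == c) := by
  by_cases h : c' = c
  · subst h
    have h2 : PySem.Chars.endswith (w ++ [c']) [c'] = true := by
      rw [PySem.Chars.endswith_iff]; exact List.suffix_append w [c']
    simp [h2]
  · have hns : ¬ ([c'] <:+ (w ++ [c])) := by
      rintro ⟨p, hp⟩
      have := List.append_inj_right hp (by have := congrArg List.length hp; simp at this; omega)
      simp at this; exact h this
    cases hE : PySem.Chars.endswith (w ++ [c]) [c']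
    · simp; exact h
    · exact absurd ((PySem.Chars.endswith_iff _ _).mp hE) hns

lemma rdropWhile_append_all {p : Char → Bool} (xs ds : List Char) (h : ∀ c ∈ ds, p c = true) :
    List.rdropWhile p (xs ++ ds) = List.rdropWhile p xs := by
  induction ds using List.reverseRecOn with
  | nil => simp
  | append_singleton ds d ih =>
      rw [← List.append_assoc, List.rdropWhile_concat_pos _ _ _ (h d (by simp))]
      exact ih (fun c hc => h c (by simp [hc]))

lemma seasons_digit (d : List Char) (hd : d ∈ geSeasons) : ∀ c ∈ d, geDigit c = true := by
  have h : geSeasons.all (fun d => d.all geDigit) = true := by decide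
  exact List.all_eq_true.mp (List.all_eq_true.mp h d hd)

lemma seasons_split (d : List Char) (hd : d ∈ geSeasons) :
    d = d.dropLast ++ [d.getLastD 'x'] ∧ geDigit (d.getLastD 'x') = true ∧ d.getLastD 'x' ≠ ')' := by
  have h : geSeasons.all
      (fun d => decide (d = d.dropLast ++ [d.getLastD 'x']) &&
        (geDigit (d.getLastD 'x') && decide (d.getLastD 'x' ≠ ')'))) = true := by decide
  have := List.all_eq_true.mp h d hd
  simp only [Bool.and_eq_true, decide_eq_true_eq] at this
  exact ⟨this.1, this.2.1, this.2.2⟩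

lemma seasons_contains (d : List Char) (hd : d ∈ geSeasons) : geSeasons.contains d = true := by
  simpa using hd

lemma contains_seasons (d : List Char) (hd : geSeasons.contains d = true) : d ∈ geSeasons := by
  simpa using hd

lemma lower_digits (d : List Char) (hd : ∀ c ∈ d, geDigit c = true) :
    PySem.Chars.lower d = d := by
  have hc : ∀ c, geDigit c = true → PySem.Chars.lowerChar c = c := by
    intro c h
    have hall : (['0','1','2','3','4','5','6','7','8','9'].all
        (fun c => PySem.Chars.lowerChar c == c)) = true := by decide
    have hm : c ∈ ['0','1','2','3','4','5','6','7','8','9'] := by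
      simpa [geDigit] using h
    simpa using List.all_eq_true.mp hall c hm
  calc PySem.Chars.lower d = d.map id := by
        unfold PySem.Chars.lower
        exact List.map_congr_left (fun c hcm => hc c (hd c hcm))
       _ = d := List.map_id d

lemma lower_append (x y : List Char) :
    PySem.Chars.lower (x ++ y) = PySem.Chars.lower x ++ PySem.Chars.lower y := by
  unfold PySem.Chars.lower; exact List.map_append ..

lemma keyParen_eq (i : Int) : geKeyParen i = geKeyOf (PySem.Int.toChars i) true := by
  unfold geKeyParen geKeyOf
  have h : ") episodes".toList = ")".toList ++ " episodes".toList := by decide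
  simp [h, List.append_assoc]

lemma keyPlain_eq (i : Int) : geKeyPlain i = geKeyOf (PySem.Int.toChars i) false := by
  unfold geKeyPlain geKeyOf
  simp [List.append_assoc]

lemma keyOf_lower (d : List Char) (hd : d ∈ geSeasons) (b : Bool) :
    PySem.Chars.lower (geKeyOf d b) = geKeyOf d b := by
  unfold geKeyOf
  cases b <;>
    simp only [if_true, if_false, Bool.false_eq_true, lower_append,
      lower_digits d (seasons_digit d hd)] <;>
    norm_num [show PySem.Chars.lower (" (season ".toList) = " (season ".toList from by decide,
      show PySem.Chars.lower (" season ".toList) = " season ".toList from by decide,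
      show PySem.Chars.lower (")".toList) = ")".toList from by decide,
      show PySem.Chars.lower (" episodes".toList) = " episodes".toList from by decide,
      show PySem.Chars.lower ([] : List Char) = [] from by decide]

-- the central characterisation: the suffix test for one key ↔ B's parse returns exactly that key
lemma geParse_iff (t d : List Char) (hd : d ∈ geSeasons) (b : Bool) :
    PySem.Chars.endswith t (geKeyOf d b) = true ↔ geParse t = some (d, b) := by
  have hdig := seasons_digit d hd
  obtain ⟨hsplit, hlast, hlastne⟩ := seasons_split d hd
  constructor
  · intro h
    obtain ⟨u, hu⟩ := (PySem.Chars.endswith_iff _ _).mp h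
    subst hu
    cases b
    · have hre : u ++ geKeyOf d false = (u ++ " season ".toList ++ d) ++ " episodes".toList := by
        simp [geKeyOf, List.append_assoc]
      rw [hre]
      have h1 : PySem.Chars.endswith ((u ++ " season ".toList ++ d) ++ " episodes".toList)
          " episodes".toList = true := endswith_append ..
      have hb0 : PySem.List.slice ((u ++ " season ".toList ++ d) ++ " episodes".toList) none
          (some (-9)) = u ++ " season ".toList ++ d :=
        slice_drop_suffix _ _ 9 (by decide) (by decide)
      have hx : u ++ " season ".toList ++ d =
          (u ++ " season ".toList ++ d.dropLast) ++ [d.getLastD 'x'] := by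
        conv_lhs => rw [hsplit]
        simp [List.append_assoc]
      have hpar : PySem.Chars.endswith (u ++ " season ".toList ++ d) ")".toList = false := by
        rw [hx, show ")".toList = [')'] from by decide, endswith_concat_singleton]
        exact beq_eq_false_iff_ne.mpr (fun e => hlastne e.symm)
      have hhead : List.rdropWhile geDigit (u ++ " season ".toList ++ d) =
          u ++ " season ".toList := by
        rw [rdropWhile_append_all _ _ hdig]
        have h2 : u ++ " season ".toList = (u ++ " season".toList) ++ [' '] := by
          rw [show " season ".toList = " season".toList ++ [' '] from by decide,
            List.append_assoc]
        rw [h2, List.rdropWhile_concat_neg _ _ _ (by decide), ← h2]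
      have hdrop : (u ++ " season ".toList ++ d).drop (u ++ " season ".toList).length = d :=
        List.drop_left
      simp only [geParse, h1, if_true, hb0, hpar, Bool.false_eq_true, if_false, hhead, hdrop,
        seasons_contains d hd, endswith_append, Bool.and_self, Bool.true_and, Bool.and_true]
    · have hre : u ++ geKeyOf d true =
          ((u ++ " (season ".toList ++ d) ++ [')']) ++ " episodes".toList := by
        simp [geKeyOf, show ")".toList = [')'] from by decide, List.append_assoc]
      rw [hre]
      have h1 : PySem.Chars.endswith (((u ++ " (season ".toList ++ d) ++ [')']) ++ " episodes".toList)
          " episodes".toList = true := endswith_append ..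
      have hb0 : PySem.List.slice (((u ++ " (season ".toList ++ d) ++ [')']) ++ " episodes".toList)
          none (some (-9)) = (u ++ " (season ".toList ++ d) ++ [')'] :=
        slice_drop_suffix _ _ 9 (by decide) (by decide)
      have hpar : PySem.Chars.endswith ((u ++ " (season ".toList ++ d) ++ [')']) ")".toList
          = true := by
        rw [show ")".toList = [')'] from by decide, endswith_concat_singleton]; rfl
      have hb1 : PySem.List.slice ((u ++ " (season ".toList ++ d) ++ [')']) none (some (-1))
          = u ++ " (season ".toList ++ d :=
        slice_drop_suffix _ _ 1 (by decide) (by decide)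
      have hhead : List.rdropWhile geDigit (u ++ " (season ".toList ++ d) =
          u ++ " (season ".toList := by
        rw [rdropWhile_append_all _ _ hdig]
        have h2 : u ++ " (season ".toList = (u ++ " (season".toList) ++ [' '] := by
          rw [show " (season ".toList = " (season".toList ++ [' '] from by decide,
            List.append_assoc]
        rw [h2, List.rdropWhile_concat_neg _ _ _ (by decide), ← h2]
      have hdrop : (u ++ " (season ".toList ++ d).drop (u ++ " (season ".toList).length = d :=
        List.drop_left
      simp only [geParse, h1, if_true, hb0, hpar, hb1, Bool.false_eq_true, if_false, if_true,
        hhead, hdrop, seasons_contains d hd, endswith_append, Bool.and_self, Bool.true_and,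
        Bool.and_true]
  · intro h
    cases h1 : PySem.Chars.endswith t " episodes".toList with
    | false =>
        simp only [geParse] at h
        rw [h1] at h
        simp at h
    | true =>
        obtain ⟨r, hr⟩ := (PySem.Chars.endswith_iff _ _).mp h1
        subst hr
        have hb0 : PySem.List.slice (r ++ " episodes".toList) none (some (-9)) = r :=
          slice_drop_suffix _ _ 9 (by decide) (by decide)
        simp only [geParse, h1, if_true, hb0] at h
        cases hpar : PySem.Chars.endswith r ")".toList with
        | false =>
            rw [hpar] at h
            simp only [Bool.false_eq_true, if_false] at h
            cases hg : (geSeasons.contains (List.drop (List.rdropWhile geDigit r).length r) &&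
                PySem.Chars.endswith (List.rdropWhile geDigit r) " season ".toList) with
            | false => rw [hg] at h; simp at h
            | true =>
                rw [hg] at h
                simp only [if_true, Option.some.injEq, Prod.mk.injEq] at h
                obtain ⟨hdg, hb⟩ := h
                obtain ⟨hc, hpre⟩ := Bool.and_eq_true_iff.mp hg
                obtain ⟨v, hv⟩ := (PySem.Chars.endswith_iff _ _).mp hpre
                obtain ⟨s2, hs2⟩ := List.rdropWhile_prefix geDigit r
                have hdig2 : List.drop (List.rdropWhile geDigit r).length r = s2 := by
                  have h0 : List.drop (List.rdropWhile geDigit r).length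
                      (List.rdropWhile geDigit r ++ s2) = s2 := List.drop_left
                  rwa [hs2] at h0
                have hds : d = s2 := by rw [← hdg, hdig2]
                have hr2 : r = (v ++ " season ".toList) ++ s2 := by rw [← hs2, ← hv]
                rw [PySem.Chars.endswith_iff]
                refine ⟨v, ?_⟩
                rw [← hb, hds, hr2]
                simp [geKeyOf, List.append_assoc]
        | true =>
            obtain ⟨w, hw⟩ := (PySem.Chars.endswith_iff _ _).mp hpar
            rw [show ")".toList = [')'] from by decide] at hw
            subst hw
            have hb1 : PySem.List.slice (w ++ [')']) none (some (-1)) = w :=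
              slice_drop_suffix _ _ 1 (by decide) (by decide)
            rw [hpar] at h
            simp only [if_true, hb1] at h
            cases hg : (geSeasons.contains (List.drop (List.rdropWhile geDigit w).length w) &&
                PySem.Chars.endswith (List.rdropWhile geDigit w) " (season ".toList) with
            | false => rw [hg] at h; simp at h
            | true =>
                rw [hg] at h
                simp only [if_true, Option.some.injEq, Prod.mk.injEq] at h
                obtain ⟨hdg, hb⟩ := h
                obtain ⟨hc, hpre⟩ := Bool.and_eq_true_iff.mp hg
                obtain ⟨v, hv⟩ := (PySem.Chars.endswith_iff _ _).mp hpre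
                obtain ⟨s2, hs2⟩ := List.rdropWhile_prefix geDigit w
                have hdig2 : List.drop (List.rdropWhile geDigit w).length w = s2 := by
                  have h0 : List.drop (List.rdropWhile geDigit w).length
                      (List.rdropWhile geDigit w ++ s2) = s2 := List.drop_left
                  rwa [hs2] at h0
                have hds : d = s2 := by rw [← hdg, hdig2]
                have hw2 : w = (v ++ " (season ".toList) ++ s2 := by rw [← hs2, ← hv]
                rw [PySem.Chars.endswith_iff]
                refine ⟨v, ?_⟩
                rw [← hb, hds, hw2]
                simp [geKeyOf, List.append_assoc, show ")".toList = [')'] from by decide]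

lemma geParse_mem (t : List Char) (d : List Char) (b : Bool) (h : geParse t = some (d, b)) :
    d ∈ geSeasons := by
  cases h1 : PySem.Chars.endswith t " episodes".toList with
  | false =>
      simp only [geParse] at h
      rw [h1] at h
      simp at h
  | true =>
      obtain ⟨r, hr⟩ := (PySem.Chars.endswith_iff _ _).mp h1
      subst hr
      have hb0 : PySem.List.slice (r ++ " episodes".toList) none (some (-9)) = r :=
        slice_drop_suffix _ _ 9 (by decide) (by decide)
      simp only [geParse, h1, if_true, hb0] at h
      cases hpar : PySem.Chars.endswith r ")".toList with
      | false =>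
          rw [hpar] at h
          simp only [Bool.false_eq_true, if_false] at h
          cases hg : (geSeasons.contains (List.drop (List.rdropWhile geDigit r).length r) &&
              PySem.Chars.endswith (List.rdropWhile geDigit r) " season ".toList) with
          | false => rw [hg] at h; simp at h
          | true =>
              rw [hg] at h
              simp only [if_true, Option.some.injEq, Prod.mk.injEq] at h
              rw [← h.1]
              exact contains_seasons _ (Bool.and_eq_true_iff.mp hg).1
      | true =>
          obtain ⟨w, hw⟩ := (PySem.Chars.endswith_iff _ _).mp hpar
          rw [show ")".toList = [')'] from by decide] at hw
          subst hw
          have hb1 : PySem.List.slice (w ++ [')']) none (some (-1)) = w :=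
            slice_drop_suffix _ _ 1 (by decide) (by decide)
          rw [hpar] at h
          simp only [if_true, hb1] at h
          cases hg : (geSeasons.contains (List.drop (List.rdropWhile geDigit w).length w) &&
              PySem.Chars.endswith (List.rdropWhile geDigit w) " (season ".toList) with
          | false => rw [hg] at h; simp at h
          | true =>
              rw [hg] at h
              simp only [if_true, Option.some.injEq, Prod.mk.injEq] at h
              rw [← h.1]
              exact contains_seasons _ (Bool.and_eq_true_iff.mp hg).1

lemma loopA_none (low nl : List Char) (L : List Int)
    (hL : ∀ i ∈ L, PySem.Int.toChars i ∈ geSeasons)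
    (hm : geParse low = none) :
    geLoopA low nl L = none := by
  induction L with
  | nil => rfl
  | cons i rest ih =>
      have hdi := hL i List.mem_cons_self
      have h1 : PySem.Chars.endswith low (PySem.Chars.lower (geKeyParen i)) = false := by
        rw [keyParen_eq, keyOf_lower _ hdi]
        cases hE : PySem.Chars.endswith low (geKeyOf (PySem.Int.toChars i) true)
        · rfl
        · rw [(geParse_iff low _ hdi true).mp hE] at hm; exact absurd hm (by simp)
      have h2 : PySem.Chars.endswith low (PySem.Chars.lower (geKeyPlain i)) = false := by
        rw [keyPlain_eq, keyOf_lower _ hdi]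
        cases hE : PySem.Chars.endswith low (geKeyOf (PySem.Int.toChars i) false)
        · rfl
        · rw [(geParse_iff low _ hdi false).mp hE] at hm; exact absurd hm (by simp)
      simp only [geLoopA, h1, h2, Bool.false_eq_true, if_false]
      exact ih (fun j hj => hL j (List.mem_cons_of_mem _ hj))

lemma loopA_some (low nl : List Char) (d : List Char) (b : Bool)
    (hm : geParse low = some (d, b)) (L : List Int)
    (hL : ∀ i ∈ L, PySem.Int.toChars i ∈ geSeasons) :
    geLoopA low nl L =
      if d ∈ L.map PySem.Int.toChars then
        some (String.ofList ("حلقات {} الموسم ".toList ++ d),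
              String.ofList (PySem.Chars.strip (pyReplaceFirstEmpty nl (geKeyOf d b))))
      else none := by
  induction L with
  | nil => rfl
  | cons i rest ih =>
      have hdi := hL i List.mem_cons_self
      have h1 : PySem.Chars.endswith low (PySem.Chars.lower (geKeyParen i)) =
          (decide (PySem.Int.toChars i = d) && b) := by
        rw [keyParen_eq, keyOf_lower _ hdi]
        by_cases hid : PySem.Int.toChars i = d
        · subst hid
          cases b
          · cases hE : PySem.Chars.endswith low (geKeyOf (PySem.Int.toChars i) true)
            · simp
            · rw [(geParse_iff low _ hdi true).mp hE] at hm; simp at hm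
          · simp [(geParse_iff low _ hdi true).mpr hm]
        · cases hE : PySem.Chars.endswith low (geKeyOf (PySem.Int.toChars i) true)
          · simp [hid]
          · rw [(geParse_iff low _ hdi true).mp hE] at hm
            simp at hm; exact absurd hm.1 hid
      have h2 : PySem.Chars.endswith low (PySem.Chars.lower (geKeyPlain i)) =
          (decide (PySem.Int.toChars i = d) && !b) := by
        rw [keyPlain_eq, keyOf_lower _ hdi]
        by_cases hid : PySem.Int.toChars i = d
        · subst hid
          cases b
          · simp [(geParse_iff low _ hdi false).mpr hm]
          · cases hE : PySem.Chars.endswith low (geKeyOf (PySem.Int.toChars i) false)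
            · simp
            · rw [(geParse_iff low _ hdi false).mp hE] at hm; simp at hm
        · cases hE : PySem.Chars.endswith low (geKeyOf (PySem.Int.toChars i) false)
          · simp [hid]
          · rw [(geParse_iff low _ hdi false).mp hE] at hm
            simp at hm; exact absurd hm.1 hid
      by_cases hid : PySem.Int.toChars i = d
      · cases b
        · simp only [geLoopA, h1, h2, hid, decide_true, Bool.and_true, Bool.and_false,
            Bool.not_false, Bool.false_eq_true, if_false, if_true]
          rw [keyPlain_eq, hid]
          simp [hid]
        · simp only [geLoopA, h1, h2, hid, decide_true, Bool.and_true, Bool.and_false,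
            Bool.not_true, Bool.false_eq_true, if_false, if_true]
          rw [keyParen_eq, hid]
          simp [hid]
      · simp only [geLoopA, h1, h2, hid, decide_false, Bool.false_and, Bool.false_eq_true,
          if_false]
        rw [ih (fun j hj => hL j (List.mem_cons_of_mem _ hj))]
        have hne : ¬ d = PySem.Int.toChars i := fun e => hid e.symm
        simp [hne]

-- ===== VERDICT (by name: the statement is the Claim_ definition above) =====
theorem get_episodes_spec : Claim_equal_get_episodes := by
  intro category3 category3_nolower _
  unfold Spec_get_episodes
  have hrange : ∀ i ∈ PySem.List.pyRange 1 11, PySem.Int.toChars i ∈ geSeasons := by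
    have h : (PySem.List.pyRange 1 11).all
        (fun i => geSeasons.contains (PySem.Int.toChars i)) = true := by decide
    exact fun i hi => contains_seasons _ (List.all_eq_true.mp h i hi)
  unfold get_episodes get_episodes_alt
  cases hm : geParse (PySem.Chars.lower category3.toList) with
  | none => rw [loopA_none _ _ _ hrange hm]
  | some p =>
      obtain ⟨d, b⟩ := p
      rw [loopA_some _ _ _ _ hm _ hrange]
      have hmem : d ∈ (PySem.List.pyRange 1 11).map PySem.Int.toChars := by
        have h1 := geParse_mem _ _ _ hm
        have h2 : geSeasons = (PySem.List.pyRange 1 11).map PySem.Int.toChars := by decide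
        rwa [h2] at h1
      rw [if_pos hmem]
      rfl
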